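-- pv_equiv track=rewrite | github.com/Schaechtle/orderedBlock | DAGutil.py | computeEdge
-- ===== SOURCE A (Python) =====
-- import copy
--
-- def computeEdge(dag,z,k):
--     # returns count for edges, usage example. How many edges from second class to first are present: nplus[1][0]
--     nplus  = [[0 for i in range(k)] for j in range(k)]
--     nminus=copy.deepcopy(nplus)
--     for i in range(len(dag)):
--         for j in range(len(dag[0])):
--             if dag[i][j]==1:
--                 nplus[z[i]][z[j]]+=1
--             else:
--                 nminus[z[i]][z[j]]+=1
--     return nplus,nminus
-- ===== SOURCE B (Python) =====
-- def computeEdge(dag, z, k):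
--     # closed-form nminus: count only edges; non-edges = (#rows in class a)*(#cols in class b) - edges
--     nplus = [[0] * k for _ in range(k)]
--     rowcount = [0] * k
--     colcount = [0] * k
--     if dag and dag[0]:
--         m = len(dag[0])
--         for i in range(len(dag)):
--             rowcount[z[i]] += 1
--             for j in range(m):
--                 if dag[i][j] == 1:
--                     nplus[z[i]][z[j]] += 1
--         for j in range(m):
--             colcount[z[j]] += 1
--     nminus = [[rowcount[a] * colcount[b] - nplus[a][b] for b in range(k)] for a in range(k)]
--     return nplus, nminus
-- ===== Notes on version B (the rewrite author's own statement) =====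
-- stated objective: alternative
-- what changed: B counts only edges in the scan (no else branch) and obtains nminus in closed form as rowcount[a]*colcount[b] - nplus[a][b] from per-class row/column tallies, instead of A's per-pair else-branch increments.
import Mathlib
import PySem

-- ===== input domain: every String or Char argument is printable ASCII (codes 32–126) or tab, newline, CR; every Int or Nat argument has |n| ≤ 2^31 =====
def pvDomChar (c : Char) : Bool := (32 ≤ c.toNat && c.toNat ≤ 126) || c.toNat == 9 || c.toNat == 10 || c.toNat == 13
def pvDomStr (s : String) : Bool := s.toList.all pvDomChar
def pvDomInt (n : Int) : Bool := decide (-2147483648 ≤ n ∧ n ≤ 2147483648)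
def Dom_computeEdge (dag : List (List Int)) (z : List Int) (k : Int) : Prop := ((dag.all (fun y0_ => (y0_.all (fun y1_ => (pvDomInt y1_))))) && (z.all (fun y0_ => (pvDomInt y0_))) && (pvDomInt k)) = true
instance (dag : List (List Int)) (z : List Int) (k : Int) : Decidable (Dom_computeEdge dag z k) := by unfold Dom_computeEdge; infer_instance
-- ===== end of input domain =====

-- B computes nminus in closed form (rowcount[a]*colcount[b] - nplus[a][b]) instead of A's
-- per-pair else-branch counting; objective: alternative decomposition, same exact values.

-- ===== PORT A =====
-- 'x[a] += 1' on a Python list, index with Python semantics (wraparound; out of range excluded by Pre_)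
def pvBump (row : List Int) (a : Int) : List Int :=
  PySem.List.pySetD row a (PySem.List.pyGetD row a 0 + 1)

-- 'M[a][b] += 1' on a Python list of lists
def pvBump2 (M : List (List Int)) (a b : Int) : List (List Int) :=
  PySem.List.pySetD M a (pvBump (PySem.List.pyGetD M a []) b)

def computeEdge (dag : List (List Int)) (z : List Int) (k : Int) : List (List Int) × List (List Int) :=
  let nplus := (PySem.List.pyRange 0 k 1).map (fun _ => (PySem.List.pyRange 0 k 1).map (fun _ => (0:Int)))
  let nminus := nplus
  (List.range dag.length).foldl (fun s i =>
    (List.range (dag.headD []).length).foldl (fun (s : List (List Int) × List (List Int)) j =>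
      if (dag.getD i []).getD j 0 == 1 then
        (pvBump2 s.1 (z.getD i 0) (z.getD j 0), s.2)
      else
        (s.1, pvBump2 s.2 (z.getD i 0) (z.getD j 0))) s) (nplus, nminus)

-- ===== PORT B =====
def computeEdge_alt (dag : List (List Int)) (z : List Int) (k : Int) : List (List Int) × List (List Int) :=
  let nplus0 := (PySem.List.pyRange 0 k 1).map (fun _ => (PySem.List.pyRange 0 k 1).map (fun _ => (0:Int)))
  let row0 : List Int := (PySem.List.pyRange 0 k 1).map (fun _ => (0:Int))
  let s :=
    if dag ≠ [] ∧ dag.headD [] ≠ [] then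
      let m := (dag.headD []).length
      let t := (List.range dag.length).foldl (fun (t : List (List Int) × List Int) i =>
        ( (List.range m).foldl (fun np j =>
            if (dag.getD i []).getD j 0 == 1 then pvBump2 np (z.getD i 0) (z.getD j 0) else np) t.1,
          pvBump t.2 (z.getD i 0) )) (nplus0, row0)
      (t.1, t.2, (List.range m).foldl (fun cc j => pvBump cc (z.getD j 0)) row0)
    else (nplus0, row0, row0)
  (s.1, (PySem.List.pyRange 0 k 1).map (fun a => (PySem.List.pyRange 0 k 1).map (fun b =>
      PySem.List.pyGetD s.2.1 a 0 * PySem.List.pyGetD s.2.2 b 0 -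
        PySem.List.pyGetD (PySem.List.pyGetD s.1 a []) b 0)))

-- ===== PRECONDITION & SPEC =====
-- Pre_ = exactly the inputs on which A returns (no IndexError): when both loop ranges are nonempty,
-- every row reaches len(dag[0]), z covers all used indices, and every used class label is in [-k, k).
def Pre_computeEdge (dag : List (List Int)) (z : List Int) (k : Int) : Prop :=
  dag = [] ∨ dag.headD [] = [] ∨
  ( (∀ row ∈ dag, (dag.headD []).length ≤ row.length) ∧
    dag.length ≤ z.length ∧ (dag.headD []).length ≤ z.length ∧
    ∀ t ∈ List.range (max dag.length (dag.headD []).length), -k ≤ z.getD t 0 ∧ z.getD t 0 < k )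

instance (dag : List (List Int)) (z : List Int) (k : Int) : Decidable (Pre_computeEdge dag z k) := by
  unfold Pre_computeEdge; infer_instance

def pvWitness_computeEdge : List (List Int) × List Int × Int := ([[1, 0], [0, 1]], [0, 1], 2)

def Spec_computeEdge (dag : List (List Int)) (z : List Int) (k : Int) (out : List (List Int) × List (List Int)) : Prop := out = computeEdge_alt dag z k
instance (dag : List (List Int)) (z : List Int) (k : Int) (out : List (List Int) × List (List Int)) : Decidable (Spec_computeEdge dag z k out) := by unfold Spec_computeEdge; infer_instance

-- ===== CLAIM (what is proved, stated in full; the proofs are below) =====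
def Claim_equal_computeEdge : Prop := ∀ (dag : List (List Int)) (z : List Int) (k : Int), Dom_computeEdge dag z k → Pre_computeEdge dag z k → Spec_computeEdge dag z k (computeEdge dag z k)

-- ===== LEMMAS AND PROOFS =====

-- effective Python index into a list of length n (wraparound for negatives)
def pvEff (n : Nat) (v : Int) : Nat := (if v < 0 then v + n else v).toNat

-- the (i, j) pairs visited by the nested loops
def pvPairs (n m : Nat) : List (Nat × Nat) :=
  (List.range n).flatMap (fun i => (List.range m).map (fun j => (i, j)))

-- a k-by-k matrix shape
def pvShape (K : Nat) (M : List (List Int)) : Prop :=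
  M.length = K ∧ ∀ row ∈ M, row.length = K

lemma pvIdx_inrange (n : Nat) (v : Int) (h1 : -(n:Int) ≤ v) (h2 : v < (n:Int)) :
    PySem.List.pyIdx? n v = some (pvEff n v) := by
  simp only [PySem.List.pyIdx?, pvEff]
  split_ifs <;> (try (exfalso; omega)) <;> simp only [Option.some.injEq] <;> omega

lemma pvSetD_inrange {α : Type} (xs : List α) (v : Int) (x : α)
    (h1 : -(xs.length:Int) ≤ v) (h2 : v < (xs.length:Int)) :
    PySem.List.pySetD xs v x = xs.set (pvEff xs.length v) x := by
  simp [PySem.List.pySetD, PySem.List.pySet?, pvIdx_inrange _ _ h1 h2]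

lemma pvGetD_inrange {α : Type} (xs : List α) (v : Int) (d : α)
    (h1 : -(xs.length:Int) ≤ v) (h2 : v < (xs.length:Int)) :
    PySem.List.pyGetD xs v d = xs.getD (pvEff xs.length v) d := by
  have he : pvEff xs.length v < xs.length := by simp [pvEff]; omega
  simp [PySem.List.pyGetD, PySem.List.pyGet?, pvIdx_inrange _ _ h1 h2,
        List.getD_eq_getElem?_getD]

lemma pvEff_lt (n : Nat) (v : Int) (h1 : -(n:Int) ≤ v) (h2 : v < (n:Int)) : pvEff n v < n := by
  simp [pvEff]; omega

lemma pv_zeroRow_getD {α : Type} (L : List α) (x : Nat) :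
    (L.map (fun _ => (0:Int))).getD x 0 = 0 := by
  rcases h : (L.map (fun _ => (0:Int)))[x]? with _ | a
  · simp [List.getD_eq_getElem?_getD, h]
  · have hm := List.mem_of_getElem? h
    simp only [List.mem_map] at hm
    obtain ⟨_, _, rfl⟩ := hm
    simp [List.getD_eq_getElem?_getD, h]

lemma pv_getD_set {α : Type} (l : List α) (i x : Nat) (r : α) (d : α) (hx : x < l.length) :
    (l.set i r).getD x d = if i = x then r else l.getD x d := by
  by_cases h : i = x
  · subst h; simp [List.getD_eq_getElem?_getD, List.getElem?_set_self hx]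
  · simp [List.getD_eq_getElem?_getD, List.getElem?_set_ne h, h]

lemma pvBump_len (row : List Int) (a : Int) : (pvBump row a).length = row.length := by
  simp [pvBump, PySem.List.pySetD, PySem.List.pySet?]
  rcases PySem.List.pyIdx? row.length a with _ | j <;> simp

lemma pvBump_getD (row : List Int) (a : Int) (x : Nat)
    (ha1 : -(row.length:Int) ≤ a) (ha2 : a < (row.length:Int)) (hx : x < row.length) :
    (pvBump row a).getD x 0 = row.getD x 0 + (if pvEff row.length a = x then 1 else 0) := by
  have he := pvEff_lt row.length a ha1 ha2
  rw [pvBump, pvSetD_inrange row a _ ha1 ha2, pvGetD_inrange row a 0 ha1 ha2]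
  by_cases h : pvEff row.length a = x
  · subst h; simp [List.getD_eq_getElem?_getD, List.getElem?_set_self, hx]
  · simp [List.getD_eq_getElem?_getD, List.getElem?_set_ne h, h]

-- matrix entry accessor
def pvEnt (M : List (List Int)) (x y : Nat) : Int := (M.getD x []).getD y 0

lemma pvShape_ent_row {K : Nat} {M : List (List Int)} (hS : pvShape K M) (x : Nat) (hx : x < K) :
    (M.getD x []).length = K := by
  obtain ⟨hl, hr⟩ := hS
  have hx' : x < M.length := hl ▸ hx
  rw [List.getD_eq_getElem?_getD, List.getElem?_eq_getElem hx']
  exact hr _ (List.getElem_mem hx')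

lemma pvBump2_eq {K : Nat} {M : List (List Int)} (hS : pvShape K M) {a : Int} (b : Int)
    (ha : -(K:Int) ≤ a ∧ a < (K:Int)) :
    pvBump2 M a b = M.set (pvEff K a) (pvBump (M.getD (pvEff K a) []) b) := by
  obtain ⟨hl, hr⟩ := hS
  rw [pvBump2, pvSetD_inrange M a _ (by rw [hl]; exact ha.1) (by rw [hl]; exact ha.2),
      pvGetD_inrange M a _ (by rw [hl]; exact ha.1) (by rw [hl]; exact ha.2), hl]

lemma pvShape_bump2 {K : Nat} {M : List (List Int)} (hS : pvShape K M) {a : Int} (b : Int)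
    (ha : -(K:Int) ≤ a ∧ a < (K:Int)) :
    pvShape K (pvBump2 M a b) := by
  rw [pvBump2_eq hS b ha]
  refine ⟨by simp [hS.1], ?_⟩
  intro row hrow
  rcases List.mem_or_eq_of_mem_set hrow with h | h
  · exact hS.2 row h
  · subst h; rw [pvBump_len]; exact pvShape_ent_row hS _ (pvEff_lt K a ha.1 ha.2)

lemma pvBump2_entry {K : Nat} (M : List (List Int)) (hS : pvShape K M) (a b : Int)
    (ha : -(K:Int) ≤ a ∧ a < (K:Int)) (hb : -(K:Int) ≤ b ∧ b < (K:Int))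
    (x y : Nat) (hx : x < K) (hy : y < K) :
    pvEnt (pvBump2 M a b) x y
      = pvEnt M x y + (if pvEff K a = x ∧ pvEff K b = y then 1 else 0) := by
  have hrowlen : (M.getD (pvEff K a) []).length = K :=
    pvShape_ent_row hS _ (pvEff_lt K a ha.1 ha.2)
  rw [pvEnt, pvEnt, pvBump2_eq hS b ha, pv_getD_set _ _ _ _ _ (hS.1 ▸ hx)]
  by_cases hax : pvEff K a = x
  · rw [if_pos hax,
      pvBump_getD _ b y (by rw [hrowlen]; exact hb.1) (by rw [hrowlen]; exact hb.2)
        (by rw [hrowlen]; exact hy), hrowlen, hax]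
    by_cases hby : pvEff K b = y <;> simp [hax, hby]
  · rw [if_neg hax]; simp [hax]

-- the loop condition 'dag[i][j] == 1' as a predicate on an index pair
def pvC (dag : List (List Int)) : Nat × Nat → Bool := fun p => (dag.getD p.1 []).getD p.2 0 == 1

-- named step and predicate, so that instantiations stay syntactically clean
def pvStep (z : List Int) (c : Nat × Nat → Bool) : List (List Int) → Nat × Nat → List (List Int) :=
  fun M p => if c p then pvBump2 M (z.getD p.1 0) (z.getD p.2 0) else M

def pvPred (K : Nat) (z : List Int) (c : Nat × Nat → Bool) (x y : Nat) : Nat × Nat → Bool :=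
  fun p => c p && (pvEff K (z.getD p.1 0) == x) && (pvEff K (z.getD p.2 0) == y)

-- the conditional-bump fold over a list of index pairs: shape and entries
lemma pvFold2_master {K : Nat} (z : List Int) (kk : Int) (hK : (K:Int) = kk)
    (c : Nat × Nat → Bool) (L : List (Nat × Nat)) (M : List (List Int)) (hS : pvShape K M)
    (hz : ∀ p ∈ L, (-kk ≤ z.getD p.1 0 ∧ z.getD p.1 0 < kk) ∧ (-kk ≤ z.getD p.2 0 ∧ z.getD p.2 0 < kk)) :
    pvShape K (L.foldl (pvStep z c) M) ∧
    ∀ x y : Nat, x < K → y < K →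
      pvEnt (L.foldl (pvStep z c) M) x y
        = pvEnt M x y + (L.countP (pvPred K z c x y) : Int) := by
  induction L generalizing M with
  | nil => exact ⟨hS, by simp [pvEnt]⟩
  | cons p L ih =>
    have hzp := hz p (by simp)
    have hz' : ∀ q ∈ L, (-kk ≤ z.getD q.1 0 ∧ z.getD q.1 0 < kk) ∧ (-kk ≤ z.getD q.2 0 ∧ z.getD q.2 0 < kk) :=
      fun q hq => hz q (by simp [hq])
    have hstep : pvShape K (pvStep z c M p) := by
      rw [pvStep]
      by_cases h : c p
      · rw [if_pos h]
        exact pvShape_bump2 hS _ ⟨by rw [hK]; exact hzp.1.1, by rw [hK]; exact hzp.1.2⟩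
      · rwa [if_neg h]
    obtain ⟨hS', hent⟩ := ih _ hstep hz'
    refine ⟨by simpa using hS', ?_⟩
    intro x y hx hy
    simp only [List.foldl_cons, List.countP_cons]
    rw [hent x y hx hy]
    show pvEnt (pvStep z c M p) x y + _ = _
    rw [pvStep, pvPred]
    by_cases h : c p
    · rw [if_pos h,
        pvBump2_entry M hS _ _ ⟨by rw [hK]; exact hzp.1.1, by rw [hK]; exact hzp.1.2⟩
          ⟨by rw [hK]; exact hzp.2.1, by rw [hK]; exact hzp.2.2⟩ x y hx hy]
      by_cases h1 : pvEff K (z.getD p.1 0) = x <;> by_cases h2 : pvEff K (z.getD p.2 0) = y <;>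
        simp [h, h1, h2] <;> push_cast <;> ring
    · simp [h]

-- the 1-D counting fold: length and entries
lemma pvFold1_master {K : Nat} (z : List Int) (kk : Int) (hK : (K:Int) = kk)
    (L : List Nat) (r : List Int) (hlen : r.length = K)
    (hz : ∀ i ∈ L, -kk ≤ z.getD i 0 ∧ z.getD i 0 < kk) :
    (L.foldl (fun r i => pvBump r (z.getD i 0)) r).length = K ∧
    ∀ x : Nat, x < K →
      (L.foldl (fun r i => pvBump r (z.getD i 0)) r).getD x 0
        = r.getD x 0 + (L.countP (fun i => pvEff K (z.getD i 0) == x) : Int) := by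
  induction L generalizing r with
  | nil => exact ⟨hlen, by simp⟩
  | cons i L ih =>
    have hzi := hz i (by simp)
    have hlen' : (pvBump r (z.getD i 0)).length = K := by rw [pvBump_len]; exact hlen
    obtain ⟨h1, h2⟩ := ih _ hlen' (fun q hq => hz q (by simp [hq]))
    refine ⟨by simpa using h1, ?_⟩
    intro x hx
    simp only [List.foldl_cons, List.countP_cons]
    rw [h2 x hx, pvBump_getD r _ x (by rw [hlen, hK]; exact hzi.1) (by rw [hlen, hK]; exact hzi.2)
        (by rw [hlen]; exact hx), hlen]
    by_cases h : pvEff K (z.getD i 0) = x <;> simp [h] <;> push_cast <;> ring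

lemma pvPairs_succ (n m : Nat) :
    pvPairs (n+1) m = pvPairs n m ++ (List.range m).map (fun j => (n, j)) := by
  simp [pvPairs, List.range_succ]

lemma pvFoldl_pairs {σ : Type} (n m : Nat) (f : σ → Nat × Nat → σ) (init : σ) :
    (pvPairs n m).foldl f init
      = (List.range n).foldl (fun s i => (List.range m).foldl (fun s j => f s (i, j)) s) init := by
  induction n generalizing init with
  | zero => simp [pvPairs]
  | succ n ih =>
    rw [pvPairs_succ, List.foldl_append, ih, List.range_succ, List.foldl_append]
    simp [List.foldl_map]

lemma pvCountP_pairs (n m : Nat) (P Q : Nat → Bool) :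
    (pvPairs n m).countP (fun p => P p.1 && Q p.2)
      = (List.range n).countP P * (List.range m).countP Q := by
  induction n with
  | zero => simp [pvPairs]
  | succ n ih =>
    rw [pvPairs_succ, List.countP_append, ih, List.range_succ, List.countP_append, List.countP_map]
    by_cases h : P n
    · simp [h, Function.comp_def, Nat.succ_mul]
    · simp [h, Function.comp_def]

lemma pvCountP_split {ι : Type} (L : List ι) (c P : ι → Bool) :
    L.countP (fun p => c p && P p) + L.countP (fun p => !c p && P p) = L.countP P := by
  induction L with
  | nil => simp
  | cons a L ih =>
    simp only [List.countP_cons]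
    by_cases hc : c a <;> by_cases hp : P a <;> simp [hc, hp] <;> omega

-- edge pairs + non-edge pairs in classes (x, y) = all pairs in classes (x, y) = rowcount * colcount
lemma pv_count_total (K : Nat) (z : List Int) (dag : List (List Int)) (x y n m : Nat) :
    (pvPairs n m).countP (pvPred K z (pvC dag) x y)
      + (pvPairs n m).countP (pvPred K z (fun p => !pvC dag p) x y)
    = (List.range n).countP (fun i => pvEff K (z.getD i 0) == x)
      * (List.range m).countP (fun j => pvEff K (z.getD j 0) == y) := by
  rw [← pvCountP_pairs n m (fun i => pvEff K (z.getD i 0) == x) (fun j => pvEff K (z.getD j 0) == y)]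
  rw [← pvCountP_split (pvPairs n m) (pvC dag)
        (fun p => (pvEff K (z.getD p.1 0) == x) && (pvEff K (z.getD p.2 0) == y))]
  congr 1
  · exact List.countP_congr (by intro p _; simp [pvPred, Bool.and_assoc])
  · exact List.countP_congr (by intro p _; simp [pvPred, Bool.and_assoc])

lemma pvFoldl_prod {σ τ ι : Type} (L : List ι) (F : σ → ι → σ) (G : τ → ι → τ) (a : σ) (b : τ) :
    L.foldl (fun s i => (F s.1 i, G s.2 i)) (a, b) = (L.foldl F a, L.foldl G b) := by
  induction L generalizing a b with
  | nil => rfl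
  | cons i L ih => simp [ih]

lemma pvFoldl_id {σ ι : Type} (L : List ι) (init : σ) :
    L.foldl (fun s _ => s) init = init := by
  induction L generalizing init with
  | nil => rfl
  | cons i L ih => simp [ih]

-- A's loop over a pair state splits into two independent folds
lemma pvA_split {σ τ : Type} (n m : Nat) (c : Nat → Nat → Bool)
    (F : σ → Nat → Nat → σ) (G : τ → Nat → Nat → τ) (a : σ) (b : τ) :
    (List.range n).foldl (fun s i => (List.range m).foldl
        (fun (s : σ × τ) j => if c i j then (F s.1 i j, s.2) else (s.1, G s.2 i j)) s) (a, b)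
      = ((List.range n).foldl (fun s i => (List.range m).foldl (fun s j => if c i j then F s i j else s) s) a,
         (List.range n).foldl (fun s i => (List.range m).foldl (fun s j => if c i j then s else G s i j) s) b) := by
  have hinner : ∀ (i : Nat) (s : σ × τ),
      (List.range m).foldl (fun (s : σ × τ) j => if c i j then (F s.1 i j, s.2) else (s.1, G s.2 i j)) s
        = ((List.range m).foldl (fun t j => if c i j then F t i j else t) s.1,
           (List.range m).foldl (fun t j => if c i j then t else G t i j) s.2) := by
    intro i s
    obtain ⟨u, v⟩ := s
    rw [show (fun (s : σ × τ) j => if c i j then (F s.1 i j, s.2) else (s.1, G s.2 i j))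
        = (fun (s : σ × τ) j => ((fun t j => if c i j then F t i j else t) s.1 j,
                                 (fun t j => if c i j then t else G t i j) s.2 j)) from by
      funext s j; by_cases h : c i j <;> simp [h]]
    exact pvFoldl_prod (List.range m) (fun t j => if c i j then F t i j else t)
      (fun t j => if c i j then t else G t i j) u v
  rw [show (fun (s : σ × τ) i => (List.range m).foldl
        (fun (s : σ × τ) j => if c i j then (F s.1 i j, s.2) else (s.1, G s.2 i j)) s)
      = (fun (s : σ × τ) i =>
          ((fun t i => (List.range m).foldl (fun t j => if c i j then F t i j else t) t) s.1 i,
           (fun t i => (List.range m).foldl (fun t j => if c i j then t else G t i j) t) s.2 i)) from by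
    funext s i; exact hinner i s]
  exact pvFoldl_prod (List.range n)
    (fun t i => (List.range m).foldl (fun t j => if c i j then F t i j else t) t)
    (fun t i => (List.range m).foldl (fun t j => if c i j then t else G t i j) t) a b

lemma pv_zeroRow_pyGetD {α : Type} (L : List α) (a : Int) (ha : 0 ≤ a) :
    PySem.List.pyGetD (L.map (fun _ => (0:Int))) a 0 = 0 := by
  rw [PySem.List.pyGetD_of_nonneg _ _ ha]; exact pv_zeroRow_getD L _

lemma pv_zeroMat_getD {α β : Type} (L : List α) (R : List β) (x y : Nat) :
    ((L.map (fun _ => R.map (fun _ => (0:Int)))).getD x []).getD y 0 = 0 := by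
  induction L generalizing x with
  | nil => simp
  | cons a L ih =>
    cases x with
    | zero => simpa using pv_zeroRow_getD R y
    | succ x => simpa using ih x

lemma pv_zeroMat_pyGetD {α β : Type} (L : List α) (R : List β) (a b : Int) (ha : 0 ≤ a) (hb : 0 ≤ b) :
    PySem.List.pyGetD (PySem.List.pyGetD (L.map (fun _ => R.map (fun _ => (0:Int)))) a []) b 0 = 0 := by
  rw [PySem.List.pyGetD_of_nonneg _ _ ha, PySem.List.pyGetD_of_nonneg _ _ hb]
  exact pv_zeroMat_getD L R _ _

lemma pv_zeroMat_shape (k : Int) :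
    pvShape k.toNat ((PySem.List.pyRange 0 k 1).map
      (fun _ => (PySem.List.pyRange 0 k 1).map (fun _ => (0:Int)))) := by
  constructor
  · simp [PySem.List.length_pyRange_one]
  · intro row hrow
    simp only [List.mem_map] at hrow
    obtain ⟨_, _, rfl⟩ := hrow
    simp [PySem.List.length_pyRange_one]

lemma pv_getElem_eq_getD {α : Type} (l : List α) (x : Nat) (d : α) (h : x < l.length) :
    l[x] = l.getD x d := by
  simp [List.getD_eq_getElem?_getD, List.getElem?_eq_getElem h]

lemma pv_getElem2_ent (M : List (List Int)) (x y : Nat) (h1 : x < M.length)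
    (h2 : y < (M[x]).length) : M[x][y] = pvEnt M x y := by
  rw [pvEnt, ← pv_getElem_eq_getD M x [] h1, ← pv_getElem_eq_getD _ y 0 h2]

-- A as a pair of independent folds over the visited (i, j) pairs
lemma pvA_eq (dag : List (List Int)) (z : List Int) (k : Int) :
    computeEdge dag z k =
      ((pvPairs dag.length (dag.headD []).length).foldl (pvStep z (pvC dag))
         ((PySem.List.pyRange 0 k 1).map (fun _ => (PySem.List.pyRange 0 k 1).map (fun _ => (0:Int)))),
       (pvPairs dag.length (dag.headD []).length).foldl (pvStep z (fun p => !pvC dag p))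
         ((PySem.List.pyRange 0 k 1).map (fun _ => (PySem.List.pyRange 0 k 1).map (fun _ => (0:Int))))) := by
  simp only [computeEdge]
  refine Eq.trans (pvA_split dag.length (dag.headD []).length
    (fun i j => (dag.getD i []).getD j 0 == 1)
    (fun M i j => pvBump2 M (z.getD i 0) (z.getD j 0))
    (fun M i j => pvBump2 M (z.getD i 0) (z.getD j 0)) _ _) ?_
  rw [pvFoldl_pairs dag.length (dag.headD []).length (pvStep z (pvC dag))
       ((PySem.List.pyRange 0 k 1).map (fun _ => (PySem.List.pyRange 0 k 1).map (fun _ => (0:Int)))),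
     pvFoldl_pairs dag.length (dag.headD []).length (pvStep z (fun p => !pvC dag p))
       ((PySem.List.pyRange 0 k 1).map (fun _ => (PySem.List.pyRange 0 k 1).map (fun _ => (0:Int))))]
  refine Prod.ext ?_ ?_
  · apply PySem.List.foldl_congr_mem
    intro s i _
    apply PySem.List.foldl_congr_mem
    intro t j _
    show (if (dag.getD i []).getD j 0 == 1 then pvBump2 t (z.getD i 0) (z.getD j 0) else t)
      = pvStep z (pvC dag) t (i, j)
    rw [pvStep, pvC]
  · apply PySem.List.foldl_congr_mem
    intro s i _
    apply PySem.List.foldl_congr_mem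
    intro t j _
    show (if (dag.getD i []).getD j 0 == 1 then t else pvBump2 t (z.getD i 0) (z.getD j 0))
      = pvStep z (fun p => !pvC dag p) t (i, j)
    rw [pvStep, pvC]
    by_cases h : (dag.getD i []).getD j 0 == 1 <;> simp [h]

-- B in the main case: same nplus fold, rowcount/colcount folds, closed-form nminus
lemma pvB_eq (dag : List (List Int)) (z : List Int) (k : Int)
    (hne1 : dag ≠ []) (hne2 : dag.headD [] ≠ []) :
    computeEdge_alt dag z k =
      ((pvPairs dag.length (dag.headD []).length).foldl (pvStep z (pvC dag))
         ((PySem.List.pyRange 0 k 1).map (fun _ => (PySem.List.pyRange 0 k 1).map (fun _ => (0:Int)))),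
       (PySem.List.pyRange 0 k 1).map (fun a => (PySem.List.pyRange 0 k 1).map (fun b =>
         PySem.List.pyGetD ((List.range dag.length).foldl (fun r i => pvBump r (z.getD i 0))
             ((PySem.List.pyRange 0 k 1).map (fun _ => (0:Int)))) a 0
         * PySem.List.pyGetD ((List.range (dag.headD []).length).foldl (fun r j => pvBump r (z.getD j 0))
             ((PySem.List.pyRange 0 k 1).map (fun _ => (0:Int)))) b 0
         - PySem.List.pyGetD (PySem.List.pyGetD
             ((pvPairs dag.length (dag.headD []).length).foldl (pvStep z (pvC dag))
               ((PySem.List.pyRange 0 k 1).map (fun _ => (PySem.List.pyRange 0 k 1).map (fun _ => (0:Int)))))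
             a []) b 0))) := by
  simp only [computeEdge_alt]
  rw [if_pos ⟨hne1, hne2⟩]
  rw [pvFoldl_prod (List.range dag.length)
      (fun np i => (List.range (dag.headD []).length).foldl
        (fun np j => if (dag.getD i []).getD j 0 == 1 then pvBump2 np (z.getD i 0) (z.getD j 0) else np) np)
      (fun r i => pvBump r (z.getD i 0)) _ _]
  rw [pvFoldl_pairs dag.length (dag.headD []).length (pvStep z (pvC dag))
       ((PySem.List.pyRange 0 k 1).map (fun _ => (PySem.List.pyRange 0 k 1).map (fun _ => (0:Int))))]
  have hfold : (List.range dag.length).foldl (fun s i => (List.range (dag.headD []).length).foldl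
        (fun s j => pvStep z (pvC dag) s (i, j)) s)
        ((PySem.List.pyRange 0 k 1).map (fun _ => (PySem.List.pyRange 0 k 1).map (fun _ => (0:Int))))
      = (List.range dag.length).foldl (fun np i => (List.range (dag.headD []).length).foldl
        (fun np j => if (dag.getD i []).getD j 0 == 1 then pvBump2 np (z.getD i 0) (z.getD j 0) else np) np)
        ((PySem.List.pyRange 0 k 1).map (fun _ => (PySem.List.pyRange 0 k 1).map (fun _ => (0:Int)))) := by
    apply PySem.List.foldl_congr_mem
    intro s i _
    apply PySem.List.foldl_congr_mem
    intro t j _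
    rw [pvStep, pvC]
  rw [hfold]


lemma pvEnt_def (M : List (List Int)) (x y : Nat) : pvEnt M x y = (M.getD x []).getD y 0 := rfl

lemma pv_zeroMat_ent {α β : Type} (L : List α) (R : List β) (x y : Nat) :
    pvEnt (L.map (fun _ => R.map (fun _ => (0:Int)))) x y = 0 := by
  rw [pvEnt_def]; exact pv_zeroMat_getD L R x y

lemma pv_main (dag : List (List Int)) (z : List Int) (k : Int)
    (hPre : Pre_computeEdge dag z k) :
    computeEdge dag z k = computeEdge_alt dag z k := by
  by_cases hdeg : dag = [] ∨ dag.headD [] = []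
  · -- degenerate: no (i, j) pair is visited, both results are all-zero k×k matrices
    have hA : computeEdge dag z k =
        ((PySem.List.pyRange 0 k 1).map (fun _ => (PySem.List.pyRange 0 k 1).map (fun _ => (0:Int))),
         (PySem.List.pyRange 0 k 1).map (fun _ => (PySem.List.pyRange 0 k 1).map (fun _ => (0:Int)))) := by
      rcases hdeg with h | h
      · subst h; simp [computeEdge]
      · simp only [computeEdge, h, List.length_nil, List.range_zero, List.foldl_nil]
        exact pvFoldl_id _ _
    have hcond : ¬ (dag ≠ [] ∧ dag.headD [] ≠ []) := by tauto
    have hB : computeEdge_alt dag z k =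
        ((PySem.List.pyRange 0 k 1).map (fun _ => (PySem.List.pyRange 0 k 1).map (fun _ => (0:Int))),
         (PySem.List.pyRange 0 k 1).map (fun _ => (PySem.List.pyRange 0 k 1).map (fun _ => (0:Int)))) := by
      simp only [computeEdge_alt]
      rw [if_neg hcond]
      refine Prod.ext rfl ?_
      apply List.map_congr_left
      intro a ha
      have ha0 : 0 ≤ a := (PySem.List.mem_pyRange_one.mp ha).1
      apply List.map_congr_left
      intro b hb
      have hb0 : 0 ≤ b := (PySem.List.mem_pyRange_one.mp hb).1
      rw [pv_zeroRow_pyGetD _ _ ha0, pv_zeroRow_pyGetD _ _ hb0, pv_zeroMat_pyGetD _ _ _ _ ha0 hb0]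
      ring
    rw [hA, hB]
  · push_neg at hdeg
    obtain ⟨hne1, hne2⟩ := hdeg
    rcases hPre with h | h | hP
    · exact absurd h hne1
    · exact absurd h hne2
    obtain ⟨hrows, hzn, hzm, hbounds⟩ := hP
    have hn : 0 < dag.length := by
      cases dag with
      | nil => exact absurd rfl hne1
      | cons a l => simp
    have hb0 := hbounds 0 (by simp only [List.mem_range]; omega)
    have hk : 0 < k := by omega
    have hK : ((k.toNat : Int)) = k := Int.toNat_of_nonneg (le_of_lt hk)
    have hzpairs : ∀ p ∈ pvPairs dag.length (dag.headD []).length,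
        (-k ≤ z.getD p.1 0 ∧ z.getD p.1 0 < k) ∧ (-k ≤ z.getD p.2 0 ∧ z.getD p.2 0 < k) := by
      intro p hp
      simp only [pvPairs, List.mem_flatMap, List.mem_map, List.mem_range] at hp
      obtain ⟨i, hi, j, hj, rfl⟩ := hp
      exact ⟨hbounds i (by simp only [List.mem_range]; omega),
             hbounds j (by simp only [List.mem_range]; omega)⟩
    obtain ⟨hSP, hentP⟩ := pvFold2_master (K := k.toNat) z k hK (pvC dag)
      (pvPairs dag.length (dag.headD []).length) _ (pv_zeroMat_shape k) hzpairs
    obtain ⟨hSM, hentM⟩ := pvFold2_master (K := k.toNat) z k hK (fun p => !pvC dag p)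
      (pvPairs dag.length (dag.headD []).length) _ (pv_zeroMat_shape k) hzpairs
    obtain ⟨hlenR, hentR⟩ := pvFold1_master (K := k.toNat) z k hK (List.range dag.length)
      ((PySem.List.pyRange 0 k 1).map (fun _ => (0:Int)))
      (by simp [PySem.List.length_pyRange_one])
      (fun i hi => hbounds i (by simp only [List.mem_range] at hi ⊢; omega))
    obtain ⟨hlenC, hentC⟩ := pvFold1_master (K := k.toNat) z k hK
      (List.range (dag.headD []).length)
      ((PySem.List.pyRange 0 k 1).map (fun _ => (0:Int)))
      (by simp [PySem.List.length_pyRange_one])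
      (fun j hj => hbounds j (by simp only [List.mem_range] at hj ⊢; omega))
    rw [pvA_eq dag z k, pvB_eq dag z k hne1 hne2]
    refine Prod.ext rfl ?_
    apply List.ext_getElem
    · rw [hSM.1]; simp [PySem.List.length_pyRange_one]
    · intro x h1 h2
      have hx : x < k.toNat := by rw [← hSM.1]; exact h1
      have hxR : x < (PySem.List.pyRange 0 k 1).length := by
        simp only [PySem.List.length_pyRange_one]; omega
      rw [List.getElem_map]
      rw [PySem.List.getElem_pyRange_one 0 k x hxR]
      simp only [zero_add]
      apply List.ext_getElem
      · rw [pv_getElem_eq_getD _ x [] h1, pvShape_ent_row hSM x hx]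
        simp [PySem.List.length_pyRange_one]
      · intro y hy1 hy2
        have hy : y < k.toNat := by
          have := hy1
          rw [pv_getElem_eq_getD _ x [] h1, pvShape_ent_row hSM x hx] at this
          exact this
        have hyR : y < (PySem.List.pyRange 0 k 1).length := by
          simp only [PySem.List.length_pyRange_one]; omega
        rw [pv_getElem2_ent _ x y h1 hy1]
        rw [List.getElem_map]
        rw [PySem.List.getElem_pyRange_one 0 k y hyR]
        simp only [zero_add]
        rw [PySem.List.pyGetD_natCast, PySem.List.pyGetD_natCast, PySem.List.pyGetD_natCast,
            PySem.List.pyGetD_natCast]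
        rw [← pvEnt_def]
        rw [hentM x y hx hy, hentP x y hx hy, hentR x hx, hentC y hy]
        rw [pv_zeroMat_ent, pv_zeroRow_getD, pv_zeroRow_getD]
        have hc := pv_count_total k.toNat z dag x y dag.length (dag.headD []).length
        have hcI : ((pvPairs dag.length (dag.headD []).length).countP
              (pvPred k.toNat z (pvC dag) x y) : Int)
            + ((pvPairs dag.length (dag.headD []).length).countP
              (pvPred k.toNat z (fun p => !pvC dag p) x y) : Int)
            = ((List.range dag.length).countP (fun i => pvEff k.toNat (z.getD i 0) == x) : Int)
            * ((List.range (dag.headD []).length).countP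
                (fun j => pvEff k.toNat (z.getD j 0) == y) : Int) := by
          exact_mod_cast hc
        linarith

-- ===== VERDICT (by name: the statement is the Claim_ definition above) =====
theorem computeEdge_spec : Claim_equal_computeEdge := by
  intro dag z k _ hPre
  exact pv_main dag z k hPre
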